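-- pv_equiv track=rewrite | github.com/Roha-Lee/sw_jungle_week_02 | jongho_lee/1715.py | get_card_compare_num
-- ===== SOURCE A (Python) =====
-- from heapq import heappush, heappop, heapify
--
-- def get_card_compare_num(cards):
--     q = cards[:]
--     heapify(q)
--
--     count = 0
--     while len(q) > 1:
--         num1 = heappop(q)
--         count += num1
--         if q:
--             num2 = heappop(q)
--             count += num2
--             heappush(q, num1 + num2)
--
--     return count
-- ===== SOURCE B (Python) =====
-- from collections import deque
--
-- def get_card_compare_num(cards):
--     leaves = deque(sorted(cards))
--     merged = deque()
--
--     def pop_smallest():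
--         if not merged or (leaves and leaves[0] <= merged[0]):
--             return leaves.popleft()
--         return merged.popleft()
--
--     count = 0
--     while len(leaves) + len(merged) > 1:
--         a = pop_smallest()
--         b = pop_smallest()
--         count += a + b
--         merged.append(a + b)
--     return count
-- ===== Notes on version B (the rewrite author's own statement) =====
-- stated objective: alternative
-- what changed: Replaces the binary heap with a sort followed by two FIFO queues (sorted leaves and merged sums, which stay non-decreasing), popping the smaller front twice per merge instead of heappop/heappush.
import Mathlib
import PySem

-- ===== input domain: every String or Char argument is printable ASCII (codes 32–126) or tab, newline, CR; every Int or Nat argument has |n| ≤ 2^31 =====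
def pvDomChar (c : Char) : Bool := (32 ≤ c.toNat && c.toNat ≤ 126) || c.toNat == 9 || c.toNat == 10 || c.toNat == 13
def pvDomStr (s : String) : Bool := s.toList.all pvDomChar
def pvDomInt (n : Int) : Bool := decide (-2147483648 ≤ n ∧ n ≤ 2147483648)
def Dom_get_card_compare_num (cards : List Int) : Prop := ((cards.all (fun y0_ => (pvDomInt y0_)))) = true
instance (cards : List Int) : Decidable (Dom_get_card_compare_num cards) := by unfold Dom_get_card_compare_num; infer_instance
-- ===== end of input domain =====

-- B replaces A's binary heap by a one-time sort plus two FIFO queues (alternative decomposition,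
-- same O(n log n) cost); equivalence of the RETURN values is proved (A mutates only its local copy).

-- ===== PORT A =====
-- heapq is modelled at the value level, which is exact for this function: an Int min-heap's only
-- observable output here is the sequence of heappop values, and heappop returns the minimum value
-- of the heap's multiset; heapify only permutes the list in place.  So the heap is the list of its
-- elements, heappop removes the first minimal value, heappush appends.
def pyHeappop? (q : List Int) : Option (Int × List Int) :=
  match PySem.List.min? q (fun x => x) with
  | none => none
  | some m => some (m, q.erase m)

theorem pyHeappop?_length {q : List Int} {m : Int} {r : List Int}
    (h : pyHeappop? q = some (m, r)) : r.length + 1 = q.length := by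
  unfold pyHeappop? at h
  cases hm : PySem.List.min? q (fun x => x) with
  | none => rw [hm] at h; exact absurd h (by simp)
  | some v =>
    rw [hm] at h
    simp only [Option.some.injEq, Prod.mk.injEq] at h
    obtain ⟨rfl, rfl⟩ := h
    have hv : v ∈ q := PySem.List.min?_mem hm
    have hlen := List.length_erase_of_mem hv
    have hpos : 0 < q.length := List.length_pos_of_mem hv
    omega

-- the while-loop of A: pop, add, (pop, add, push sum) while more than one element remains
def heapMergeLoop (q : List Int) (count : Int) : Int :=
  if 1 < q.length then
    match h1 : pyHeappop? q with
    | none => count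
    | some (num1, q1) =>
      if q1 = [] then count + num1
      else
        match h2 : pyHeappop? q1 with
        | none => count + num1
        | some (num2, q2) => heapMergeLoop (q2 ++ [num1 + num2]) (count + num1 + num2)
  else count
termination_by q.length
decreasing_by
  have e1 := pyHeappop?_length h1
  have e2 := pyHeappop?_length h2
  simp only [List.length_append, List.length_cons, List.length_nil]
  omega

def get_card_compare_num (cards : List Int) : Int :=
  -- q = cards[:]; heapify(q)  (heap modelled by its element list, see above)
  heapMergeLoop cards 0

-- ===== PORT B =====
-- pop_smallest(): the smaller of the two queue fronts (leaves preferred on ties)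
def qpopSmallest : List Int → List Int → Option (Int × List Int × List Int)
  | [], [] => none
  | l :: ls, [] => some (l, ls, [])
  | [], m :: ms => some (m, [], ms)
  | l :: ls, m :: ms =>
      if l ≤ m then some (l, ls, m :: ms) else some (m, l :: ls, ms)

theorem qpopSmallest_length {lv mg : List Int} {a : Int} {l' m' : List Int}
    (h : qpopSmallest lv mg = some (a, l', m')) :
    l'.length + m'.length + 1 = lv.length + mg.length := by
  cases lv with
  | nil => cases mg with
    | nil => exact absurd h (by simp [qpopSmallest])
    | cons m ms => simp only [qpopSmallest, Option.some.injEq, Prod.mk.injEq] at h; obtain ⟨rfl, rfl, rfl⟩ := h; simp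
  | cons l ls => cases mg with
    | nil => simp only [qpopSmallest, Option.some.injEq, Prod.mk.injEq] at h; obtain ⟨rfl, rfl, rfl⟩ := h; simp
    | cons m ms =>
      simp only [qpopSmallest] at h
      split at h <;>
        (simp only [Option.some.injEq, Prod.mk.injEq] at h; obtain ⟨rfl, rfl, rfl⟩ := h; simp) <;> omega

-- the while-loop of B over the two queues
def twoQueueLoop (leaves merged : List Int) (count : Int) : Int :=
  if 1 < leaves.length + merged.length then
    match h1 : qpopSmallest leaves merged with
    | none => count
    | some (a, l1, m1) =>
      match h2 : qpopSmallest l1 m1 with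
      | none => count
      | some (b, l2, m2) => twoQueueLoop l2 (m2 ++ [a + b]) (count + (a + b))
  else count
termination_by leaves.length + merged.length
decreasing_by
  have e1 := qpopSmallest_length h1
  have e2 := qpopSmallest_length h2
  simp only [List.length_append, List.length_cons, List.length_nil]
  omega

def get_card_compare_num_alt (cards : List Int) : Int :=
  twoQueueLoop (PySem.List.sorted cards (fun x => x) false) [] 0

-- ===== PRECONDITION & SPEC =====
def Spec_get_card_compare_num (cards : List Int) (out : Int) : Prop := out = get_card_compare_num_alt cards
instance (cards : List Int) (out : Int) : Decidable (Spec_get_card_compare_num cards out) := by unfold Spec_get_card_compare_num; infer_instance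

-- ===== CLAIM (what is proved, stated in full; the proofs are below) =====
def Claim_equal_get_card_compare_num : Prop := ∀ (cards : List Int), Dom_get_card_compare_num cards → Spec_get_card_compare_num cards (get_card_compare_num cards)

-- ===== LEMMAS AND PROOFS =====

-- queue invariant: the last (most recently appended) merged sum is at most the sum of any two
-- distinct remaining elements, so merged sums stay in non-decreasing order
def QInv (lv mg : List Int) : Prop :=
  ∀ b, mg.getLast? = some b → ∀ y z : Int, [y, z].Sublist (lv ++ mg.dropLast) → b ≤ y + z

theorem qpop_cases {lv mg : List Int} {a : Int} {l' m' : List Int}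
    (h : qpopSmallest lv mg = some (a, l', m')) :
    (lv = a :: l' ∧ m' = mg) ∨ (l' = lv ∧ mg = a :: m') := by
  cases lv with
  | nil => cases mg with
    | nil => exact absurd h (by simp [qpopSmallest])
    | cons m ms =>
      simp only [qpopSmallest, Option.some.injEq, Prod.mk.injEq] at h
      obtain ⟨rfl, rfl, rfl⟩ := h; right; exact ⟨rfl, rfl⟩
  | cons l ls => cases mg with
    | nil =>
      simp only [qpopSmallest, Option.some.injEq, Prod.mk.injEq] at h
      obtain ⟨rfl, rfl, rfl⟩ := h; left; exact ⟨rfl, rfl⟩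
    | cons m ms =>
      simp only [qpopSmallest] at h
      split at h <;> simp only [Option.some.injEq, Prod.mk.injEq] at h <;>
        obtain ⟨rfl, rfl, rfl⟩ := h
      · left; exact ⟨rfl, rfl⟩
      · right; exact ⟨rfl, rfl⟩

theorem qpop_perm {lv mg : List Int} {a : Int} {l' m' : List Int}
    (h : qpopSmallest lv mg = some (a, l', m')) :
    (lv ++ mg).Perm (a :: (l' ++ m')) := by
  rcases qpop_cases h with ⟨rfl, rfl⟩ | ⟨rfl, rfl⟩
  · exact List.Perm.refl _
  · exact List.perm_middle

theorem qpop_min {lv mg : List Int} {a : Int} {l' m' : List Int}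
    (hl : lv.Pairwise (· ≤ ·)) (hm : mg.Pairwise (· ≤ ·))
    (h : qpopSmallest lv mg = some (a, l', m')) :
    ∀ x ∈ lv ++ mg, a ≤ x := by
  intro x hx
  rw [List.mem_append] at hx
  cases lv with
  | nil => cases mg with
    | nil => exact absurd h (by simp [qpopSmallest])
    | cons m ms =>
      simp only [qpopSmallest, Option.some.injEq, Prod.mk.injEq] at h
      obtain ⟨rfl, rfl, rfl⟩ := h
      rcases hx with hx | hx
      · exact absurd hx (by simp)
      · rcases List.mem_cons.mp hx with rfl | hx
        · exact le_refl _
        · exact (List.pairwise_cons.mp hm).1 x hx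
  | cons l ls => cases mg with
    | nil =>
      simp only [qpopSmallest, Option.some.injEq, Prod.mk.injEq] at h
      obtain ⟨rfl, rfl, rfl⟩ := h
      rcases hx with hx | hx
      · rcases List.mem_cons.mp hx with rfl | hx
        · exact le_refl _
        · exact (List.pairwise_cons.mp hl).1 x hx
      · exact absurd hx (by simp)
    | cons m ms =>
      simp only [qpopSmallest] at h
      split at h <;> simp only [Option.some.injEq, Prod.mk.injEq] at h <;>
        obtain ⟨rfl, rfl, rfl⟩ := h
      · rename_i hle
        rcases hx with hx | hx
        · rcases List.mem_cons.mp hx with rfl | hx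
          · exact le_refl _
          · exact (List.pairwise_cons.mp hl).1 x hx
        · rcases List.mem_cons.mp hx with rfl | hx
          · exact hle
          · exact le_trans hle ((List.pairwise_cons.mp hm).1 x hx)
      · rename_i hle
        push Not at hle
        rcases hx with hx | hx
        · rcases List.mem_cons.mp hx with rfl | hx
          · exact le_of_lt hle
          · exact le_trans (le_of_lt hle) ((List.pairwise_cons.mp hl).1 x hx)
        · rcases List.mem_cons.mp hx with rfl | hx
          · exact le_refl _
          · exact (List.pairwise_cons.mp hm).1 x hx

theorem qpop_isSome {lv mg : List Int} (h : 0 < lv.length + mg.length) :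
    ∃ a l' m', qpopSmallest lv mg = some (a, l', m') := by
  cases lv with
  | nil => cases mg with
    | nil => simp at h
    | cons m ms => exact ⟨m, [], ms, rfl⟩
  | cons l ls => cases mg with
    | nil => exact ⟨l, ls, [], rfl⟩
    | cons m ms =>
      by_cases hle : l ≤ m
      · exact ⟨l, ls, m :: ms, by simp [qpopSmallest, hle]⟩
      · exact ⟨m, l :: ls, ms, by simp [qpopSmallest, hle]⟩

theorem pyHeappop?_none_iff {q : List Int} : pyHeappop? q = none ↔ q = [] := by
  unfold pyHeappop?
  cases hm : PySem.List.min? q (fun x => x) with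
  | none => simpa using (PySem.List.min?_eq_none_iff q (fun x => x)).mp hm
  | some v =>
    simp only [reduceCtorEq, false_iff]
    intro hq
    rw [hq] at hm
    exact absurd hm (by simp [PySem.List.min?])

theorem pyHeappop?_spec {q : List Int} {m : Int} {r : List Int}
    (h : pyHeappop? q = some (m, r)) :
    PySem.List.min? q (fun x => x) = some m ∧ r = q.erase m := by
  unfold pyHeappop? at h
  cases hm : PySem.List.min? q (fun x => x) with
  | none => rw [hm] at h; exact absurd h (by simp)
  | some v =>
    rw [hm] at h
    simp only [Option.some.injEq, Prod.mk.injEq] at h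
    obtain ⟨rfl, rfl⟩ := h
    exact ⟨rfl, rfl⟩

-- two permuted lists have the same minimum value
theorem min_value_eq {q q' : List Int} {m m' : Int} (hp : q.Perm q')
    (h : PySem.List.min? q (fun x => x) = some m)
    (h' : PySem.List.min? q' (fun x => x) = some m') : m = m' := by
  have hm : m ∈ q := PySem.List.min?_mem h
  have hm' : m' ∈ q' := PySem.List.min?_mem h'
  have h1 : m ≤ m' := PySem.List.min?_isMin h m' (hp.mem_iff.mpr hm')
  have h2 : m' ≤ m := PySem.List.min?_isMin h' m (hp.mem_iff.mp hm)
  exact le_antisymm h1 h2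

-- heapMergeLoop depends on its list argument only through its multiset
theorem heapMergeLoop_perm : ∀ (n : Nat) (q q' : List Int) (c : Int),
    q.length = n → q.Perm q' → heapMergeLoop q c = heapMergeLoop q' c := by
  intro n
  induction n using Nat.strong_induction_on with
  | _ n IH =>
    intro q q' c hlen hperm
    have hlen' : q'.length = n := hperm.length_eq ▸ hlen
    rw [heapMergeLoop, heapMergeLoop]
    by_cases hgt : 1 < q.length
    · have hgt' : 1 < q'.length := by omega
      simp only [hgt, hgt', if_true]
      cases h1 : pyHeappop? q with
      | none => exact absurd (pyHeappop?_none_iff.mp h1) (by intro he; rw [he] at hgt; simp at hgt)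
      | some p =>
        obtain ⟨m1, q1⟩ := p
        cases h1' : pyHeappop? q' with
        | none => exact absurd (pyHeappop?_none_iff.mp h1') (by intro he; rw [he] at hgt'; simp at hgt')
        | some p' =>
          obtain ⟨m1', q1'⟩ := p'
          obtain ⟨hmin1, hq1⟩ := pyHeappop?_spec h1
          obtain ⟨hmin1', hq1'⟩ := pyHeappop?_spec h1'
          have hm1 : m1 = m1' := min_value_eq hperm hmin1 hmin1'
          subst hm1
          have hp1 : q1.Perm q1' := by rw [hq1, hq1']; exact hperm.erase m1
          have hl1 : q1.length + 1 = q.length := pyHeappop?_length h1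
          by_cases hq1e : q1 = []
          · have hq1e' : q1' = [] := by
              have hh := hp1.length_eq; rw [hq1e] at hh
              exact List.length_eq_zero_iff.mp (by simpa using hh.symm)
            simp [hq1e, hq1e']
          · have hq1e' : q1' ≠ [] := by
              intro he; rw [he] at hp1
              exact hq1e (List.length_eq_zero_iff.mp (by simpa using hp1.length_eq))
            simp only [hq1e, hq1e', if_false]
            cases h2 : pyHeappop? q1 with
            | none => exact absurd (pyHeappop?_none_iff.mp h2) hq1e
            | some r =>
              obtain ⟨m2, q2⟩ := r
              cases h2' : pyHeappop? q1' with
              | none => exact absurd (pyHeappop?_none_iff.mp h2') hq1e'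
              | some r' =>
                obtain ⟨m2', q2'⟩ := r'
                obtain ⟨hmin2, hq2⟩ := pyHeappop?_spec h2
                obtain ⟨hmin2', hq2'⟩ := pyHeappop?_spec h2'
                have hm2 : m2 = m2' := min_value_eq hp1 hmin2 hmin2'
                subst hm2
                have hl2 : q2.length + 1 = q1.length := pyHeappop?_length h2
                exact IH (q2 ++ [m1 + m2]).length (by simp; omega)
                  (q2 ++ [m1 + m2]) (q2' ++ [m1 + m2]) (c + m1 + m2) rfl
                  (by rw [hq2, hq2']; exact (hp1.erase m2).append_right _)
    · have hgt' : ¬ 1 < q'.length := by omega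
      simp [hgt, hgt']


-- unfolding equations for the two loops
theorem twoQueueLoop_base {lv mg : List Int} {c : Int} (h : ¬ 1 < lv.length + mg.length) :
    twoQueueLoop lv mg c = c := by
  rw [twoQueueLoop]; simp [h]

theorem twoQueueLoop_step {lv mg : List Int} {c : Int} {a b : Int} {l1 m1 l2 m2 : List Int}
    (h : 1 < lv.length + mg.length)
    (h1 : qpopSmallest lv mg = some (a, l1, m1))
    (h2 : qpopSmallest l1 m1 = some (b, l2, m2)) :
    twoQueueLoop lv mg c = twoQueueLoop l2 (m2 ++ [a + b]) (c + (a + b)) := by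
  rw [twoQueueLoop, if_pos h]
  split
  · rename_i heq; rw [h1] at heq; exact absurd heq (by simp)
  · rename_i a' l1' m1' heq
    rw [h1] at heq
    simp only [Option.some.injEq, Prod.mk.injEq] at heq
    obtain ⟨rfl, rfl, rfl⟩ := heq
    split
    · rename_i heq2; rw [h2] at heq2; exact absurd heq2 (by simp)
    · rename_i b' l2' m2' heq2
      rw [h2] at heq2
      simp only [Option.some.injEq, Prod.mk.injEq] at heq2
      obtain ⟨rfl, rfl, rfl⟩ := heq2
      rfl

theorem heapMergeLoop_base {q : List Int} {c : Int} (h : ¬ 1 < q.length) :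
    heapMergeLoop q c = c := by
  rw [heapMergeLoop]; simp [h]

theorem heapMergeLoop_step {q : List Int} {c : Int} {m1 m2 : Int} {q1 q2 : List Int}
    (hgt : 1 < q.length) (hp1 : pyHeappop? q = some (m1, q1)) (hne : q1 ≠ [])
    (hp2 : pyHeappop? q1 = some (m2, q2)) :
    heapMergeLoop q c = heapMergeLoop (q2 ++ [m1 + m2]) (c + m1 + m2) := by
  rw [heapMergeLoop, if_pos hgt]
  split
  · rename_i heq; rw [hp1] at heq; exact absurd heq (by simp)
  · rename_i n1' q1' heq
    rw [hp1] at heq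
    simp only [Option.some.injEq, Prod.mk.injEq] at heq
    obtain ⟨rfl, rfl⟩ := heq
    rw [if_neg hne]
    split
    · rename_i heq2; rw [hp2] at heq2; exact absurd heq2 (by simp)
    · rename_i n2' q2' heq2
      rw [hp2] at heq2
      simp only [Option.some.injEq, Prod.mk.injEq] at heq2
      obtain ⟨rfl, rfl⟩ := heq2
      rfl

-- the minimum value of a list is characterised by membership and minimality
theorem min?_eq_of_isMin {xs : List Int} {a : Int} (hmem : a ∈ xs) (hmin : ∀ x ∈ xs, a ≤ x) :
    PySem.List.min? xs (fun x => x) = some a := by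
  cases hm : PySem.List.min? xs (fun x => x) with
  | none =>
    have hx := (PySem.List.min?_eq_none_iff xs (fun x => x)).mp hm
    rw [hx] at hmem; simp at hmem
  | some v =>
    have hv : v ∈ xs := PySem.List.min?_mem hm
    have hva : v ≤ a := PySem.List.min?_isMin hm a hmem
    have hav : a ≤ v := hmin v hv
    rw [le_antisymm hva hav]

theorem qpop_sorted {lv mg : List Int} {a : Int} {l' m' : List Int}
    (hl : lv.Pairwise (· ≤ ·)) (hm : mg.Pairwise (· ≤ ·))
    (h : qpopSmallest lv mg = some (a, l', m')) :
    l'.Pairwise (· ≤ ·) ∧ m'.Pairwise (· ≤ ·) := by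
  rcases qpop_cases h with ⟨he, hf⟩ | ⟨he, hf⟩
  · subst he; exact ⟨(List.pairwise_cons.mp hl).2, hf ▸ hm⟩
  · subst hf; exact ⟨he ▸ hl, (List.pairwise_cons.mp hm).2⟩

theorem qpop_mem {lv mg : List Int} {a : Int} {l' m' : List Int}
    (h : qpopSmallest lv mg = some (a, l', m')) : a ∈ lv ++ mg :=
  (qpop_perm h).mem_iff.mpr (List.mem_cons_self)

theorem qpop_subset {lv mg : List Int} {a : Int} {l' m' : List Int}
    (h : qpopSmallest lv mg = some (a, l', m')) :
    ∀ x ∈ l' ++ m', x ∈ lv ++ mg :=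
  fun x hx => (qpop_perm h).mem_iff.mpr (List.mem_cons_of_mem a hx)

-- in a ≤-sorted list every member is at most the last element
theorem mem_le_getLast : ∀ {l : List Int}, l.Pairwise (· ≤ ·) →
    ∀ {x : Int}, x ∈ l → ∀ (hne : l ≠ []), x ≤ l.getLast hne := by
  intro l
  induction l with
  | nil => intro _ x hx; simp at hx
  | cons y t ih =>
    intro hs x hx hne
    cases t with
    | nil =>
      rcases List.mem_cons.mp hx with rfl | hx'
      · simp [List.getLast]
      · simp at hx'
    | cons z ts =>
      rw [List.getLast_cons (by simp)]
      rcases List.mem_cons.mp hx with rfl | hx'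
      · exact (List.pairwise_cons.mp hs).1 _ (List.getLast_mem _)
      · exact ih (List.pairwise_cons.mp hs).2 hx' _

-- the two values popped in one round bound every sum still waiting in the merged queue
theorem popped_pair_bound {lv mg : List Int} {a b : Int} {l1 m1 l2 m2 : List Int}
    (hm : mg.Pairwise (· ≤ ·)) (hinv : QInv lv mg)
    (h1 : qpopSmallest lv mg = some (a, l1, m1))
    (h2 : qpopSmallest l1 m1 = some (b, l2, m2))
    (hne : m2 ≠ []) : ∀ x ∈ m2, x ≤ a + b := by
  intro x hx
  rcases qpop_cases h1 with ⟨h1e, h1f⟩ | ⟨h1e, h1f⟩ <;>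
    rcases qpop_cases h2 with ⟨h2e, h2f⟩ | ⟨h2e, h2f⟩
  · -- both pops from the leaves queue: lv = a :: b :: l2, m2 = mg
    have hmgne : mg ≠ [] := by rw [← h1f, ← h2f]; exact hne
    have hxmg : x ∈ mg := by rw [← h1f, ← h2f]; exact hx
    have hsb : [a, b].Sublist (lv ++ mg.dropLast) := by
      rw [h1e, h2e]
      exact List.Sublist.trans (((List.nil_sublist l2).cons₂ b).cons₂ a) (List.sublist_append_left _ _)
    have hLle := hinv _ (List.getLast?_eq_some_getLast hmgne) a b hsb
    have hxle := mem_le_getLast hm hxmg hmgne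
    omega
  · -- first from leaves, second from merged: mg = b :: m2
    have hmg : mg = b :: m2 := by rw [← h1f, h2f]
    have hmgne : mg ≠ [] := by rw [hmg]; simp
    have hxmg : x ∈ mg := by rw [hmg]; exact List.mem_cons_of_mem _ hx
    obtain ⟨w, ws, hw⟩ := List.exists_cons_of_ne_nil hne
    have hdl : mg.dropLast = b :: m2.dropLast := by rw [hmg, hw]; rfl
    have hsb : [a, b].Sublist (lv ++ mg.dropLast) := by
      rw [h1e, hdl]
      exact (List.singleton_sublist.mpr
        (List.mem_append_right l1 List.mem_cons_self)).cons₂ a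
    have hLle := hinv _ (List.getLast?_eq_some_getLast hmgne) a b hsb
    have hxle := mem_le_getLast hm hxmg hmgne
    omega
  · -- first from merged, second from leaves: mg = a :: m2, lv = b :: l2
    have hmg : mg = a :: m2 := by rw [h1f, h2f]
    have hmgne : mg ≠ [] := by rw [hmg]; simp
    have hxmg : x ∈ mg := by rw [hmg]; exact List.mem_cons_of_mem _ hx
    obtain ⟨w, ws, hw⟩ := List.exists_cons_of_ne_nil hne
    have hdl : mg.dropLast = a :: m2.dropLast := by rw [hmg, hw]; rfl
    have hlv : lv = b :: l2 := by rw [← h1e, h2e]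
    have hsb : [b, a].Sublist (lv ++ mg.dropLast) := by
      rw [hlv, hdl]
      exact (List.singleton_sublist.mpr
        (List.mem_append_right l2 List.mem_cons_self)).cons₂ b
    have hLle := hinv _ (List.getLast?_eq_some_getLast hmgne) b a hsb
    have hxle := mem_le_getLast hm hxmg hmgne
    omega
  · -- both from merged: mg = a :: b :: m2
    have hmg : mg = a :: b :: m2 := by rw [h1f, h2f]
    have hmgne : mg ≠ [] := by rw [hmg]; simp
    have hxmg : x ∈ mg := by
      rw [hmg]; exact List.mem_cons_of_mem _ (List.mem_cons_of_mem _ hx)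
    obtain ⟨w, ws, hw⟩ := List.exists_cons_of_ne_nil hne
    have hdl : mg.dropLast = a :: b :: m2.dropLast := by rw [hmg, hw]; rfl
    have hsb : [a, b].Sublist (lv ++ mg.dropLast) := by
      rw [hdl]
      exact List.Sublist.trans (((List.nil_sublist _).cons₂ b).cons₂ a)
        (List.sublist_append_right lv _)
    have hLle := hinv _ (List.getLast?_eq_some_getLast hmgne) a b hsb
    have hxle := mem_le_getLast hm hxmg hmgne
    omega

-- main invariant lemma: the two-queue loop equals the value-level heap loop
theorem twoQueue_eq_heap : ∀ (n : Nat) (lv mg : List Int) (c : Int),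
    lv.length + mg.length = n →
    lv.Pairwise (· ≤ ·) → mg.Pairwise (· ≤ ·) → QInv lv mg →
    twoQueueLoop lv mg c = heapMergeLoop (lv ++ mg) c := by
  intro n
  induction n using Nat.strong_induction_on with
  | _ n IH =>
    intro lv mg c hn hl hm hinv
    by_cases hgt : 1 < lv.length + mg.length
    · obtain ⟨a, l1, m1, h1⟩ := qpop_isSome (lv := lv) (mg := mg) (by omega)
      have e1 := qpopSmallest_length h1
      obtain ⟨b, l2, m2, h2⟩ := qpop_isSome (lv := l1) (mg := m1) (by omega)
      have e2 := qpopSmallest_length h2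
      obtain ⟨hl1, hm1⟩ := qpop_sorted hl hm h1
      obtain ⟨hl2, hm2s⟩ := qpop_sorted hl1 hm1 h2
      have hamem : a ∈ lv ++ mg := qpop_mem h1
      have hamin : ∀ x ∈ lv ++ mg, a ≤ x := qpop_min hl hm h1
      have hbmem1 : b ∈ l1 ++ m1 := qpop_mem h2
      have hbmin : ∀ x ∈ l1 ++ m1, b ≤ x := qpop_min hl1 hm1 h2
      have hab : a ≤ b := hamin b (qpop_subset h1 b hbmem1)
      -- heap side: the first two pops return a and b
      have hpop1 : pyHeappop? (lv ++ mg) = some (a, (lv ++ mg).erase a) := by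
        unfold pyHeappop?; rw [min?_eq_of_isMin hamem hamin]
      have hperm1 : ((lv ++ mg).erase a).Perm (l1 ++ m1) := by
        have hp := (qpop_perm h1).erase a
        rwa [List.erase_cons_head] at hp
      have hr1ne : (lv ++ mg).erase a ≠ [] := by
        intro he
        have hlen := hperm1.length_eq
        rw [he] at hlen
        simp at hlen
        omega
      have hbmem' : b ∈ (lv ++ mg).erase a := hperm1.mem_iff.mpr hbmem1
      have hbmin' : ∀ x ∈ (lv ++ mg).erase a, b ≤ x :=
        fun x hx => hbmin x (hperm1.mem_iff.mp hx)
      have hpop2 : pyHeappop? ((lv ++ mg).erase a) =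
          some (b, ((lv ++ mg).erase a).erase b) := by
        unfold pyHeappop?; rw [min?_eq_of_isMin hbmem' hbmin']
      have hperm2 : (((lv ++ mg).erase a).erase b).Perm (l2 ++ m2) := by
        have hq := (hperm1.erase b).trans ((qpop_perm h2).erase b)
        rwa [List.erase_cons_head] at hq
      -- invariants for the next round
      have hbound : ∀ x ∈ m2, x ≤ a + b := by
        by_cases hm2e : m2 = []
        · intro x hx; rw [hm2e] at hx; simp at hx
        · exact popped_pair_bound hm hinv h1 h2 hm2e
      have hm2' : (m2 ++ [a + b]).Pairwise (· ≤ ·) := by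
        rw [List.pairwise_append]
        refine ⟨hm2s, List.pairwise_singleton _ _, ?_⟩
        intro x hx y hy
        rcases List.mem_singleton.mp hy with rfl
        exact hbound x hx
      have hinv' : QInv l2 (m2 ++ [a + b]) := by
        intro B hB y z hsub
        have hBval : (m2 ++ [a + b]).getLast? = some (a + b) := by simp
        rw [hBval] at hB
        have hBe : B = a + b := (Option.some.inj hB).symm
        have hdl : (m2 ++ [a + b]).dropLast = m2 := by simp
        rw [hdl] at hsub
        have hy : y ∈ l2 ++ m2 := hsub.subset (by simp)
        have hz : z ∈ l2 ++ m2 := hsub.subset (by simp)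
        have hby : b ≤ y := hbmin y (qpop_subset h2 y hy)
        have hbz : b ≤ z := hbmin z (qpop_subset h2 z hz)
        omega
      -- put the step together
      rw [twoQueueLoop_step hgt h1 h2,
          heapMergeLoop_step (by simpa using hgt) hpop1 hr1ne hpop2]
      have hIH := IH (l2.length + (m2 ++ [a + b]).length)
        (by simp only [List.length_append, List.length_cons, List.length_nil]; omega)
        l2 (m2 ++ [a + b]) (c + (a + b)) rfl hl2 hm2' hinv'
      rw [hIH]
      have hpermF : (l2 ++ (m2 ++ [a + b])).Perm (((lv ++ mg).erase a).erase b ++ [a + b]) := by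
        rw [← List.append_assoc]
        exact hperm2.symm.append_right _
      rw [heapMergeLoop_perm (l2 ++ (m2 ++ [a + b])).length _ _ _ rfl hpermF]
      have hc : c + (a + b) = c + a + b := by ring
      rw [hc]
    · rw [twoQueueLoop_base hgt, heapMergeLoop_base (by simpa using hgt)]


-- ===== VERDICT (by name: the statement is the Claim_ definition above) =====
theorem get_card_compare_num_spec : Claim_equal_get_card_compare_num := by
  intro cards _
  unfold Spec_get_card_compare_num get_card_compare_num get_card_compare_num_alt
  have hs : (PySem.List.sorted cards (fun x => x) false).Pairwise (· ≤ ·) :=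
    PySem.List.sorted_pairwise cards (fun x => x)
  have h1 := twoQueue_eq_heap (PySem.List.sorted cards (fun x => x) false).length
    (PySem.List.sorted cards (fun x => x) false) [] 0 (by simp) hs (by simp)
    (by intro b hb; simp at hb)
  have h2 := heapMergeLoop_perm (PySem.List.sorted cards (fun x => x) false).length
    (PySem.List.sorted cards (fun x => x) false) cards 0 rfl
    (PySem.List.sorted_perm cards (fun x => x) false)
  rw [h1, List.append_nil, h2]
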